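-- pv_equiv track=rewrite | github.com/samfdwang/Topology | Alg_Pair.py | get_filtration
-- ===== SOURCE A (Python) =====
-- import copy
--
-- def get_filtration(K0,sigma):
--     i = 1
--     fi = [{} for x in range(len(sigma)+1)]
--     fi[0]=K0
--     for ind in sigma:
--         tmp = copy.deepcopy(fi[i-1])
--         sig = sigma[ind]
--         if len(sig)<2:
--             tmp[0][i]=sig
--         else:
--             if len(sig)<3:
--                 tmp[1][i]=sig
--             else:
--                 if len(sig)<4:
--                     tmp[2][i]=sig
--         fi[i]=tmp
--         i+=1
--     return fi
-- ===== SOURCE B (Python) =====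
-- import copy
--
-- def get_filtration(K0, sigma):
--     # Phase 1: gather additions (1-based index, bucket by len, the simplex); len>=4 is skipped.
--     adds = []
--     i = 1
--     for ind in sigma:
--         sig = sigma[ind]
--         n = len(sig)
--         b = 0 if n < 2 else (1 if n < 3 else (2 if n < 4 else None))
--         if b is not None:
--             adds.append((i, b, sig))
--         i += 1
--     # Phase 2: materialize each snapshot independently from K0.
--     fi = [K0]
--     for j in range(1, len(sigma) + 1):
--         snap = copy.deepcopy(K0)
--         for (idx, b, sig) in adds:
--             if idx <= j:
--                 snap[b][idx] = sig
--         fi.append(snap)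
--     return fi
-- ===== Notes on version B (the rewrite author's own statement) =====
-- stated objective: alternative
-- what changed: A builds each snapshot by deepcopying the previous snapshot and mutating it in one chained loop; B first gathers the list of (index, bucket, simplex) additions in one pass over sigma and then rebuilds every snapshot independently from K0 by inserting the additions with index <= j.
import Mathlib
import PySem

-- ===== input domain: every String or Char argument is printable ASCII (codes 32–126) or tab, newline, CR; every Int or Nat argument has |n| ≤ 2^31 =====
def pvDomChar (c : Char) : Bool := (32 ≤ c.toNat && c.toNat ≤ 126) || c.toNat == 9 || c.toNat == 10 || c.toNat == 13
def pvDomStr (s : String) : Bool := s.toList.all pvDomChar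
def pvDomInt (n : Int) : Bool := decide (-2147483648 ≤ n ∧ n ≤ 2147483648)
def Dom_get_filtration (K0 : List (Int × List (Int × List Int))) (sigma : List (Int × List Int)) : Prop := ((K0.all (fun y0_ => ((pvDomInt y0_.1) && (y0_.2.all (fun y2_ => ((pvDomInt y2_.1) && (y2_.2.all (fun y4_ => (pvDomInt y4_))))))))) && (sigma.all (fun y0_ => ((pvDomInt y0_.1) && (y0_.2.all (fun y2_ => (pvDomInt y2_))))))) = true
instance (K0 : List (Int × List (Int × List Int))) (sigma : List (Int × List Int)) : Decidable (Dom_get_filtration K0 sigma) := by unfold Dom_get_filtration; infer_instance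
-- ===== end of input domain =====

-- B rebuilds every snapshot independently from K0 out of a gathered list of additions
-- instead of A's chained deepcopy-of-the-previous-snapshot; objective: alternative decomposition, same result.

-- ===== PORT A =====
-- `tmp[b][i] = sig` on the assoc-list model: overwrite-in-place insert into the inner dict at bucket b.
-- (Python raises KeyError when bucket b is absent; Pre_ excludes that; here modify would add the bucket.)
def pvBucketSet (s : List (Int × List (Int × List Int))) (b i : Int) (sig : List Int) :
    List (Int × List (Int × List Int)) :=
  ((PySem.Dict.mk s).modify b [] (fun inner => ((PySem.Dict.mk inner).insert i sig).items)).items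

def get_filtration_loop (sigma : List (Int × List Int))
    (prev : List (Int × List (Int × List Int))) (i : Int) :
    List (Int × List Int) → List (List (Int × List (Int × List Int)))
  | [] => []
  | (ind, _) :: rest =>
    -- sig = sigma[ind]  (ind is a key of sigma, so the lookup succeeds)
    let sig := ((PySem.Dict.mk sigma).get? ind).getD []
    let tmp :=
      if sig.length < 2 then pvBucketSet prev 0 i sig
      else if sig.length < 3 then pvBucketSet prev 1 i sig
      else if sig.length < 4 then pvBucketSet prev 2 i sig
      else prev
    tmp :: get_filtration_loop sigma tmp (i + 1) rest

def get_filtration (K0 : List (Int × List (Int × List Int))) (sigma : List (Int × List Int)) :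
    List (List (Int × List (Int × List Int))) :=
  K0 :: get_filtration_loop sigma K0 1 sigma

-- ===== PORT B =====
-- Phase 1: the list of additions (i, bucket, sig), 1-based, in sigma's order; len ≥ 4 is skipped.
def pvCollect (sigma : List (Int × List Int)) : Int → List (Int × List Int) → List (Int × Int × List Int)
  | _, [] => []
  | i, (ind, _) :: rest =>
    let sig := ((PySem.Dict.mk sigma).get? ind).getD []
    (if sig.length < 2 then [(i, 0, sig)]
     else if sig.length < 3 then [(i, 1, sig)]
     else if sig.length < 4 then [(i, 2, sig)]
     else []) ++ pvCollect sigma (i + 1) rest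

-- Phase 2: snapshot j = fresh copy of K0 with every addition of index ≤ j inserted.
def pvSnapshot (K0 : List (Int × List (Int × List Int))) (adds : List (Int × Int × List Int))
    (j : Int) : List (Int × List (Int × List Int)) :=
  adds.foldl (fun s a => if a.1 ≤ j then pvBucketSet s a.2.1 a.1 a.2.2 else s) K0

def get_filtration_alt (K0 : List (Int × List (Int × List Int))) (sigma : List (Int × List Int)) :
    List (List (Int × List (Int × List Int))) :=
  K0 :: (PySem.List.pyRange 1 ((sigma.length : Int) + 1) 1).map
    (fun j => pvSnapshot K0 (pvCollect sigma 1 sigma) j)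

-- ===== PRECONDITION & SPEC =====
-- Pre_ excludes (a) assoc lists with duplicate keys (in sigma, in K0, or inside K0's inner dicts),
-- which do not represent a Python dict faithfully — Python collapses them before either function runs —
-- and (b) inputs where some simplex of length < 4 targets a bucket missing from K0, on which A (and B)
-- raise KeyError at `tmp[b][i] = sig`.
def Pre_get_filtration (K0 : List (Int × List (Int × List Int))) (sigma : List (Int × List Int)) : Prop :=
  (sigma.map Prod.fst).Nodup ∧ (K0.map Prod.fst).Nodup ∧
  (∀ p ∈ K0, (p.2.map Prod.fst).Nodup) ∧
  (∀ p ∈ sigma, 4 ≤ p.2.length ∨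
    (if p.2.length < 2 then (0 : Int) else if p.2.length < 3 then 1 else 2) ∈ K0.map Prod.fst)

instance (K0 : List (Int × List (Int × List Int))) (sigma : List (Int × List Int)) :
    Decidable (Pre_get_filtration K0 sigma) := by unfold Pre_get_filtration; infer_instance

def pvWitness_get_filtration : (List (Int × List (Int × List Int))) × (List (Int × List Int)) :=
  ([(0, []), (1, []), (2, [])], [(10, [1]), (11, [1, 2]), (12, [1, 2, 3, 4])])

def Spec_get_filtration (K0 : List (Int × List (Int × List Int))) (sigma : List (Int × List Int)) (out : List (List (Int × List (Int × List Int)))) : Prop := out = get_filtration_alt K0 sigma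
instance (K0 : List (Int × List (Int × List Int))) (sigma : List (Int × List Int)) (out : List (List (Int × List (Int × List Int)))) : Decidable (Spec_get_filtration K0 sigma out) := by unfold Spec_get_filtration; infer_instance

-- ===== CLAIM (what is proved, stated in full; the proofs are below) =====
def Claim_equal_get_filtration : Prop := ∀ (K0 : List (Int × List (Int × List Int))) (sigma : List (Int × List Int)), Dom_get_filtration K0 sigma → Pre_get_filtration K0 sigma → Spec_get_filtration K0 sigma (get_filtration K0 sigma)

-- ===== LEMMAS AND PROOFS =====

-- every addition collected from start index i0 has index ≥ i0
lemma pvCollect_index_ge (sigma : List (Int × List Int)) :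
    ∀ (rest : List (Int × List Int)) (i0 : Int) (a : Int × Int × List Int),
      a ∈ pvCollect sigma i0 rest → i0 ≤ a.1 := by
  intro rest
  induction rest with
  | nil => intro i0 a h; simp [pvCollect] at h
  | cons hd tl ih =>
    intro i0 a h
    obtain ⟨ind, v⟩ := hd
    simp only [pvCollect, List.mem_append] at h
    rcases h with h | h
    · split_ifs at h <;> simp_all
    · have := ih (i0 + 1) a h; omega

-- a snapshot fold over additions whose indices all exceed j is the identity
lemma pvSnapshot_skip (adds : List (Int × Int × List Int)) :
    ∀ (s : List (Int × List (Int × List Int))) (j : Int),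
      (∀ a ∈ adds, j < a.1) → pvSnapshot s adds j = s := by
  induction adds with
  | nil => intro s j _; rfl
  | cons a tl ih =>
    intro s j h
    have ha : j < a.1 := h a (List.mem_cons_self)
    have hstep : pvSnapshot s (a :: tl) j
        = pvSnapshot (if a.1 ≤ j then pvBucketSet s a.2.1 a.1 a.2.2 else s) tl j := rfl
    rw [hstep, if_neg (by omega)]
    exact ih s j (fun b hb => h b (List.mem_cons_of_mem a hb))

lemma pvSnapshot_append (s : List (Int × List (Int × List Int)))
    (l₁ l₂ : List (Int × Int × List Int)) (j : Int) :
    pvSnapshot s (l₁ ++ l₂) j = pvSnapshot (pvSnapshot s l₁ j) l₂ j := by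
  simp [pvSnapshot, List.foldl_append]

-- the head addition of a cons step, applied at any j ≥ i0, produces A's tmp
lemma pvSnapshot_head (s : List (Int × List (Int × List Int)))
    (i0 j : Int) (hj : i0 ≤ j) (sig : List Int) :
    pvSnapshot s
      (if sig.length < 2 then [(i0, 0, sig)]
       else if sig.length < 3 then [(i0, 1, sig)]
       else if sig.length < 4 then [(i0, 2, sig)]
       else []) j
    = (if sig.length < 2 then pvBucketSet s 0 i0 sig
       else if sig.length < 3 then pvBucketSet s 1 i0 sig
       else if sig.length < 4 then pvBucketSet s 2 i0 sig
       else s) := by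
  split_ifs <;> simp [pvSnapshot, hj]

-- main invariant: A's loop from (prev, i0) equals B's per-snapshot rebuild from prev
lemma loop_eq_snapshots (sigma : List (Int × List Int)) :
    ∀ (rest : List (Int × List Int)) (i0 : Int) (prev : List (Int × List (Int × List Int))),
      get_filtration_loop sigma prev i0 rest
        = (List.range rest.length).map
            (fun (k : Nat) => pvSnapshot prev (pvCollect sigma i0 rest) (i0 + (k : Int))) := by
  intro rest
  induction rest with
  | nil => intro i0 prev; rfl
  | cons hd tl ih =>
    intro i0 prev
    obtain ⟨ind, v⟩ := hd
    set sig := ((PySem.Dict.mk sigma).get? ind).getD [] with hsig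
    have hcoll : pvCollect sigma i0 ((ind, v) :: tl)
        = (if sig.length < 2 then [(i0, 0, sig)]
           else if sig.length < 3 then [(i0, 1, sig)]
           else if sig.length < 4 then [(i0, 2, sig)]
           else []) ++ pvCollect sigma (i0 + 1) tl := rfl
    set tmp := (if sig.length < 2 then pvBucketSet prev 0 i0 sig
      else if sig.length < 3 then pvBucketSet prev 1 i0 sig
      else if sig.length < 4 then pvBucketSet prev 2 i0 sig
      else prev) with htmp
    have hloop : get_filtration_loop sigma prev i0 ((ind, v) :: tl)
        = tmp :: get_filtration_loop sigma tmp (i0 + 1) tl := rfl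
    have hhead : ∀ j : Int, i0 ≤ j →
        pvSnapshot prev (pvCollect sigma i0 ((ind, v) :: tl)) j
          = pvSnapshot tmp (pvCollect sigma (i0 + 1) tl) j := by
      intro j hj
      rw [hcoll, pvSnapshot_append, pvSnapshot_head prev i0 j hj sig, ← htmp]
    rw [hloop, ih (i0 + 1) tmp]
    rw [List.length_cons, List.range_succ_eq_map, List.map_cons, List.map_map]
    refine congrArg₂ List.cons ?_ ?_
    · rw [show ((0 : Nat) : Int) = 0 by simp, add_zero, hhead i0 le_rfl]
      exact (pvSnapshot_skip _ tmp i0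
        (fun a ha => by have := pvCollect_index_ge sigma tl (i0 + 1) a ha; omega)).symm
    · apply List.map_congr_left
      intro k _
      have hk : ((k.succ : ℕ) : Int) = (k : Int) + 1 := by push_cast; ring
      rw [Function.comp_apply, hk, show i0 + ((k : Int) + 1) = i0 + 1 + (k : Int) by ring]
      exact (hhead (i0 + 1 + (k : Int)) (by omega)).symm
      
-- ===== VERDICT (by name: the statement is the Claim_ definition above) =====
theorem get_filtration_spec : Claim_equal_get_filtration := by
  intro K0 sigma _ _
  unfold Spec_get_filtration get_filtration get_filtration_alt
  rw [loop_eq_snapshots sigma sigma 1 K0]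
  congr 1
  rw [PySem.List.pyRange_one]
  have hn : ((sigma.length : Int) + 1 - 1).toNat = sigma.length := by omega
  rw [hn, List.map_map]
  apply List.map_congr_left
  intro k _
  simp [Function.comp]
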